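-- pv_equiv track=rewrite | github.com/21f3000813/tds-virtual-ta | answer_engine.py | get_links_from_context
-- ===== SOURCE A (Python) =====
-- def get_links_from_context(context_chunks):
--     links = []
--     for chunk in context_chunks:
--         for line in chunk.splitlines():
--             if "http" in line:
--                 links.append({
--                     "url": line.strip(),
--                     "text": line.strip()
--                 })
--     # Return unique links only (max 3)
--     seen = set()
--     unique_links = []
--     for link in links:
--         if link["url"] not in seen:
--             unique_links.append(link)
--             seen.add(link["url"])
--         if len(unique_links) == 3:
--             break
--     return unique_links
-- ===== SOURCE B (Python) =====
-- def get_links_from_context(context_chunks):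
--     seen = set()
--     result = []
--     for chunk in context_chunks:
--         for line in chunk.splitlines():
--             if "http" in line:
--                 s = line.strip()
--                 if s not in seen:
--                     result.append({"url": s, "text": s})
--                     seen.add(s)
--                     if len(result) == 3:
--                         return result
--     return result
-- ===== Notes on version B (the rewrite author's own statement) =====
-- stated objective: simpler
-- what changed: B fuses A's two phases (collect all matching lines, then dedup-and-truncate) into one single pass with a seen-set and an early return as soon as 3 unique links are found, so the full links list is never built.
import Mathlib
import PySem

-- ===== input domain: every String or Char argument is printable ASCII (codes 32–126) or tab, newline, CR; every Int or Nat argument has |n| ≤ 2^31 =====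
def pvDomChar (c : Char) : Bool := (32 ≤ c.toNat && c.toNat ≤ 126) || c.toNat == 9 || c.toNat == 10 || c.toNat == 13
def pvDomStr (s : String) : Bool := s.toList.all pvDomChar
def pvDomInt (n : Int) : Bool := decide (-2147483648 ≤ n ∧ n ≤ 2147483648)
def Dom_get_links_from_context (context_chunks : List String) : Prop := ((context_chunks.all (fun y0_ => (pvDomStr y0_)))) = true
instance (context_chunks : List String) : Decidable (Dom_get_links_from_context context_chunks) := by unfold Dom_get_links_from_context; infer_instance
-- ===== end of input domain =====

-- B fuses A's two phases (collect every matching line, then dedup and truncate to 3)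
-- into one single pass with a seen-set and an early return at the third unique link (objective: simpler).

-- ===== PORT A =====
-- second loop of A: for link in links: dedup with seen, break at len 3
def pvDedupA : List (List (String × String)) → PySem.Set String → List (List (String × String)) → List (List (String × String))
  | [], _, uniq => uniq
  | l :: rest, seen, uniq =>
    -- link["url"]: first-match lookup in the assoc list; the key is always present in A's links
    let u := (List.lookup "url" l).getD ""
    let p := if !(PySem.Set.contains seen u) then (PySem.Set.add seen u, uniq ++ [l]) else (seen, uniq)
    if p.2.length = 3 then p.2 else pvDedupA rest p.1 p.2

def get_links_from_context (context_chunks : List String) : List (List (String × String)) :=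
  let links := context_chunks.foldl (fun acc chunk =>
    (PySem.Str.splitlines chunk).foldl (fun acc2 line =>
      if PySem.Str.isIn "http" line then
        acc2 ++ [[("url", PySem.Str.strip line), ("text", PySem.Str.strip line)]]
      else acc2) acc) []
  pvDedupA links PySem.Set.empty []

-- ===== PORT B =====
-- inner loop over the lines of one chunk: .inr = early return with the final result, .inl = carry the state on
def pvGoLines : List String → PySem.Set String → List (List (String × String)) →
    (PySem.Set String × List (List (String × String))) ⊕ List (List (String × String))
  | [], seen, res => .inl (seen, res)
  | line :: rest, seen, res =>
    if PySem.Str.isIn "http" line then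
      let s := PySem.Str.strip line
      if PySem.Set.contains seen s then pvGoLines rest seen res
      else
        let res' := res ++ [[("url", s), ("text", s)]]
        if res'.length = 3 then .inr res'
        else pvGoLines rest (PySem.Set.add seen s) res'
    else pvGoLines rest seen res

def pvGoChunks : List String → PySem.Set String → List (List (String × String)) → List (List (String × String))
  | [], _, res => res
  | c :: rest, seen, res =>
    match pvGoLines (PySem.Str.splitlines c) seen res with
    | .inr final => final
    | .inl (seen', res') => pvGoChunks rest seen' res'

def get_links_from_context_alt (context_chunks : List String) : List (List (String × String)) :=
  pvGoChunks context_chunks PySem.Set.empty []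

-- ===== PRECONDITION & SPEC =====
def Spec_get_links_from_context (context_chunks : List String) (out : List (List (String × String))) : Prop := out = get_links_from_context_alt context_chunks
instance (context_chunks : List String) (out : List (List (String × String))) : Decidable (Spec_get_links_from_context context_chunks out) := by unfold Spec_get_links_from_context; infer_instance

-- ===== CLAIM (what is proved, stated in full; the proofs are below) =====
def Claim_equal_get_links_from_context : Prop := ∀ (context_chunks : List String), Dom_get_links_from_context context_chunks → Spec_get_links_from_context context_chunks (get_links_from_context context_chunks)

-- ===== LEMMAS AND PROOFS =====

-- the links one list of lines contributes in A's first phase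
def pvLinks : List String → List (List (String × String))
  | [] => []
  | line :: rest =>
    if PySem.Str.isIn "http" line then
      [("url", PySem.Str.strip line), ("text", PySem.Str.strip line)] :: pvLinks rest
    else pvLinks rest

-- A's dedup loop with the state made explicit (.inl = ran off the end, .inr = broke at 3)
def pvDedupS : List (List (String × String)) → PySem.Set String → List (List (String × String)) →
    (PySem.Set String × List (List (String × String))) ⊕ List (List (String × String))
  | [], seen, uniq => .inl (seen, uniq)
  | l :: rest, seen, uniq =>
    let u := (List.lookup "url" l).getD ""
    let p := if !(PySem.Set.contains seen u) then (PySem.Set.add seen u, uniq ++ [l]) else (seen, uniq)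
    if p.2.length = 3 then .inr p.2 else pvDedupS rest p.1 p.2

theorem pvDedupA_eq_S (xs : List (List (String × String))) (seen : PySem.Set String)
    (uniq : List (List (String × String))) :
    pvDedupA xs seen uniq = (match pvDedupS xs seen uniq with
      | .inl (_, r) => r | .inr r => r) := by
  induction xs generalizing seen uniq with
  | nil => simp [pvDedupA, pvDedupS]
  | cons l rest ih =>
    simp only [pvDedupA, pvDedupS]
    split_ifs <;> simp [ih]

theorem pvDedupS_append (xs ys : List (List (String × String))) (s : PySem.Set String)
    (u : List (List (String × String))) :
    pvDedupS (xs ++ ys) s u = (match pvDedupS xs s u with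
      | .inr r => .inr r | .inl (s', u') => pvDedupS ys s' u') := by
  induction xs generalizing s u with
  | nil => simp [pvDedupS]
  | cons l rest ih =>
    simp only [List.cons_append, pvDedupS]
    split_ifs <;> simp [ih]

theorem pvDedupS_inl_len (xs : List (List (String × String))) (s : PySem.Set String)
    (u : List (List (String × String))) (s' : PySem.Set String)
    (u' : List (List (String × String))) (hlt : u.length < 3)
    (h : pvDedupS xs s u = .inl (s', u')) : u'.length < 3 := by
  induction xs generalizing s u with
  | nil =>
    simp only [pvDedupS, Sum.inl.injEq, Prod.mk.injEq] at h
    exact h.2 ▸ hlt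
  | cons l rest ih =>
    simp only [pvDedupS] at h
    by_cases hc : PySem.Set.contains s ((List.lookup "url" l).getD "") = true
    · simp only [hc, Bool.not_true, Bool.false_eq_true, if_false] at h
      rw [if_neg (by omega)] at h
      exact ih _ _ hlt h
    · rw [Bool.not_eq_true] at hc
      simp only [hc, Bool.not_false, if_true] at h
      by_cases h3 : (u ++ [l]).length = 3
      · rw [if_pos h3] at h; exact absurd h (by simp)
      · rw [if_neg h3] at h
        refine ih _ _ ?_ h
        simp only [List.length_append, List.length_cons, List.length_nil] at h3 ⊢
        omega

theorem pvLookup_mk (s : String) :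
    (List.lookup "url" [("url", s), ("text", s)]).getD "" = s := by
  simp [List.lookup]

theorem pvGoLines_eq (lines : List String) (seen : PySem.Set String)
    (res : List (List (String × String))) (hlt : res.length < 3) :
    pvGoLines lines seen res = pvDedupS (pvLinks lines) seen res := by
  induction lines generalizing seen res with
  | nil => simp [pvGoLines, pvLinks, pvDedupS]
  | cons line rest ih =>
    by_cases hh : PySem.Str.isIn "http" line = true
    · rw [pvLinks, if_pos hh]
      simp only [pvGoLines, hh, if_true, pvDedupS, pvLookup_mk]
      cases hc : PySem.Set.contains seen (PySem.Str.strip line) with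
      | true =>
        simp only [Bool.not_true, Bool.false_eq_true, if_false, if_true]
        rw [if_neg (show ¬ res.length = 3 by omega)]
        exact ih seen res hlt
      | false =>
        simp only [Bool.not_false, Bool.false_eq_true, if_false, if_true]
        by_cases h3 : (res ++ [[("url", PySem.Str.strip line), ("text", PySem.Str.strip line)]]).length = 3
        · rw [if_pos h3, if_pos h3]
        · rw [if_neg h3, if_neg h3]
          refine ih _ _ ?_
          simp only [List.length_append, List.length_cons, List.length_nil] at h3 ⊢
          omega
    · rw [pvLinks, if_neg hh]
      simp only [pvGoLines, hh, Bool.false_eq_true, if_false]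
      exact ih seen res hlt

theorem pvGoChunks_eq (chunks : List String) (seen : PySem.Set String)
    (res : List (List (String × String))) (hlt : res.length < 3) :
    pvGoChunks chunks seen res =
      (match pvDedupS (chunks.flatMap (fun c => pvLinks (PySem.Str.splitlines c))) seen res with
        | .inl (_, r) => r | .inr r => r) := by
  induction chunks generalizing seen res with
  | nil => simp [pvGoChunks, pvDedupS]
  | cons c rest ih =>
    simp only [pvGoChunks, List.flatMap_cons, pvDedupS_append, ← pvGoLines_eq _ _ _ hlt]
    cases h : pvGoLines (PySem.Str.splitlines c) seen res with
    | inl p =>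
      have hlen : p.2.length < 3 := by
        refine pvDedupS_inl_len (pvLinks (PySem.Str.splitlines c)) seen res p.1 p.2 hlt ?_
        rw [← pvGoLines_eq _ _ _ hlt, h]
      exact ih p.1 p.2 hlen
    | inr r => rfl

theorem pvCollect_inner (lines : List String) (acc : List (List (String × String))) :
    lines.foldl (fun acc2 line =>
      if PySem.Str.isIn "http" line then
        acc2 ++ [[("url", PySem.Str.strip line), ("text", PySem.Str.strip line)]]
      else acc2) acc = acc ++ pvLinks lines := by
  induction lines generalizing acc with
  | nil => simp [pvLinks]
  | cons line rest ih =>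
    rw [List.foldl_cons, pvLinks]
    by_cases hh : PySem.Str.isIn "http" line = true
    · rw [if_pos hh, if_pos hh, ih, List.append_assoc, List.singleton_append]
    · rw [if_neg hh, if_neg hh, ih]

theorem pvCollect_outer (chunks : List String) (acc : List (List (String × String))) :
    chunks.foldl (fun acc chunk =>
      (PySem.Str.splitlines chunk).foldl (fun acc2 line =>
        if PySem.Str.isIn "http" line then
          acc2 ++ [[("url", PySem.Str.strip line), ("text", PySem.Str.strip line)]]
        else acc2) acc) acc
      = acc ++ chunks.flatMap (fun c => pvLinks (PySem.Str.splitlines c)) := by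
  induction chunks generalizing acc with
  | nil => simp
  | cons c rest ih =>
    rw [List.foldl_cons, pvCollect_inner, ih, List.flatMap_cons, List.append_assoc]

-- ===== VERDICT (by name: the statement is the Claim_ definition above) =====
theorem get_links_from_context_spec : Claim_equal_get_links_from_context := by
  intro chunks _
  unfold Spec_get_links_from_context get_links_from_context get_links_from_context_alt
  rw [pvCollect_outer, List.nil_append, pvDedupA_eq_S,
    pvGoChunks_eq chunks PySem.Set.empty [] (by simp)]
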